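-- pv_equiv track=rewrite | github.com/Sang-Buster/AeroLex-Tuner | pre_proc/Step4_format_T1_T2.py | parse_atc_blocks
-- ===== SOURCE A (Python) =====
-- from typing import Dict, List
--
-- def parse_atc_blocks(content: str) -> List[Dict]:
--     """Parse the entire content into a list of message blocks."""
--     lines = content.splitlines()
--     blocks = []
--     current_block_lines = []
--
--     for line in lines:
--         if line.strip() == "":
--             # Skip empty lines
--             continue
--         if line.startswith("{") and current_block_lines:
--             # Start of a new block; save the previous one
--             blocks.append("\n".join(current_block_lines))
--             current_block_lines = [line]
--         else:
--             current_block_lines.append(line)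
--
--     if current_block_lines:
--         blocks.append("\n".join(current_block_lines))
--
--     return blocks
-- ===== SOURCE B (Python) =====
-- def parse_atc_blocks(content):
--     """Parse the entire content into a list of message blocks."""
--     ne = [l for l in content.splitlines() if l.strip()]
--     blocks = []
--     while ne:
--         j = 1
--         while j < len(ne) and not ne[j].startswith("{"):
--             j += 1
--         blocks.append("\n".join(ne[:j]))
--         ne = ne[j:]
--     return blocks
-- ===== Notes on version B (the rewrite author's own statement) =====
-- stated objective: alternative
-- what changed: B first filters out blank lines, then repeatedly scans ahead to the next brace-opening line and slices off one whole block at a time, instead of A's single pass with a running buffer flushed at each brace-opening line.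
import Mathlib
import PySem

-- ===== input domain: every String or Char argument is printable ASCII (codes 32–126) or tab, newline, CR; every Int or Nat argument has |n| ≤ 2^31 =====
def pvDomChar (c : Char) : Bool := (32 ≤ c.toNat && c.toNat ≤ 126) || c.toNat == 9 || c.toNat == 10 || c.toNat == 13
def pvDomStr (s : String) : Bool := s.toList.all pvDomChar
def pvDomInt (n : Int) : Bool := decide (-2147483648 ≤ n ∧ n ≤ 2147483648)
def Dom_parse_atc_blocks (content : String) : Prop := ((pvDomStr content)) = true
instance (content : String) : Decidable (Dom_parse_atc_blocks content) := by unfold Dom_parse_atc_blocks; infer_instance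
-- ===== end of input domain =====

-- B: filter out blank lines first, then slice off one block at a time by scanning
-- ahead to the next '{'-line — an alternative decomposition of A's buffer/flush pass.

-- ===== PORT A =====
def pvStepA (st : List String × List String) (line : String) : List String × List String :=
  if PySem.Str.strip line == "" then st
  else if PySem.Str.startswith line "{" && !st.2.isEmpty then
    (st.1 ++ [PySem.Str.join "\n" st.2], [line])
  else (st.1, st.2 ++ [line])

def parse_atc_blocks (content : String) : List String :=
  let lines := PySem.Str.splitlines content
  let st := lines.foldl pvStepA ([], [])
  if st.2.isEmpty then st.1 else st.1 ++ [PySem.Str.join "\n" st.2]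

-- ===== PORT B =====
-- the outer `while ne:` loop of Source B as structural recursion on the remaining lines;
-- the inner index-scanning while loop is the takeWhile of the non-'{' lines, so
-- ne[:j] = h :: body and ne[j:] = rest.drop body.length (exact)
def pvCut (lines : List String) : List String :=
  match lines with
  | [] => []
  | h :: rest =>
      let body := rest.takeWhile (fun l => !(PySem.Str.startswith l "{"))
      PySem.Str.join "\n" (h :: body) :: pvCut (rest.drop body.length)
termination_by lines.length
decreasing_by simp only [List.length_drop, List.length_cons]; omega

def parse_atc_blocks_alt (content : String) : List String :=
  pvCut ((PySem.Str.splitlines content).filter (fun l => !(PySem.Str.strip l == "")))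

-- ===== PRECONDITION & SPEC =====
def Spec_parse_atc_blocks (content : String) (out : List String) : Prop := out = parse_atc_blocks_alt content
instance (content : String) (out : List String) : Decidable (Spec_parse_atc_blocks content out) := by unfold Spec_parse_atc_blocks; infer_instance

-- ===== CLAIM (what is proved, stated in full; the proofs are below) =====
def Claim_equal_parse_atc_blocks : Prop := ∀ (content : String), Dom_parse_atc_blocks content → Spec_parse_atc_blocks content (parse_atc_blocks content)

-- ===== LEMMAS AND PROOFS =====

-- "join the running block, then go on", a recursion mirroring A's fold over nonblank lines
def pvJoinGo (cur : List String) (ls : List String) : List String :=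
  match ls with
  | [] => [PySem.Str.join "\n" cur]
  | l :: ls' =>
      if PySem.Str.startswith l "{" then
        PySem.Str.join "\n" cur :: pvJoinGo [l] ls'
      else pvJoinGo (cur ++ [l]) ls'

theorem pvCut_cons (h : String) (rest : List String) :
    pvCut (h :: rest) =
      PySem.Str.join "\n" (h :: rest.takeWhile (fun l => !(PySem.Str.startswith l "{")))
        :: pvCut (rest.drop (rest.takeWhile (fun l => !(PySem.Str.startswith l "{"))).length) := by
  rw [pvCut.eq_def]

-- A's fold skips blank lines, so folding over the blank-filtered list is the same
theorem pvFoldA_filter (ls : List String) (st : List String × List String) :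
    ls.foldl pvStepA st = (ls.filter (fun l => !(PySem.Str.strip l == ""))).foldl pvStepA st := by
  induction ls generalizing st with
  | nil => rfl
  | cons l ls ih =>
      by_cases h : PySem.Str.strip l == ""
      · simp [List.filter_cons, h, List.foldl_cons, pvStepA, ih]
      · rw [show (l :: ls).filter (fun l => !(PySem.Str.strip l == ""))
              = l :: ls.filter (fun l => !(PySem.Str.strip l == "")) from by
            simp [List.filter_cons, h]]
        rw [List.foldl_cons, List.foldl_cons]
        exact ih _

-- A's fold with a nonempty buffer over nonblank lines computes pvJoinGo
theorem pvFoldA_joinGo (ls : List String) (cur blocks : List String)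
    (hcur : cur ≠ []) (hls : ∀ l ∈ ls, ¬(PySem.Str.strip l == "")) :
    (let st := ls.foldl pvStepA (blocks, cur)
     if st.2.isEmpty then st.1 else st.1 ++ [PySem.Str.join "\n" st.2]) =
    blocks ++ pvJoinGo cur ls := by
  induction ls generalizing cur blocks with
  | nil =>
      simp [pvJoinGo, List.isEmpty_iff, hcur]
  | cons l ls ih =>
      have hl : ¬(PySem.Str.strip l == "") := hls l (by simp)
      have hls' : ∀ x ∈ ls, ¬(PySem.Str.strip x == "") := fun x hx => hls x (by simp [hx])
      by_cases hq : PySem.Chars.startswith l.toList ['{'] = true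
      · have hstep : pvStepA (blocks, cur) l =
            (blocks ++ [PySem.Str.join "\n" cur], [l]) := by
          simp [pvStepA, hl, hq, List.isEmpty_iff, hcur]
        simp only [List.foldl_cons, hstep]
        rw [ih [l] _ (by simp) hls']
        simp [pvJoinGo, hq]
      · have hstep : pvStepA (blocks, cur) l = (blocks, cur ++ [l]) := by
          simp [pvStepA, hl, hq]
        simp only [List.foldl_cons, hstep]
        rw [ih (cur ++ [l]) _ (by simp) hls']
        simp [pvJoinGo, hq]

-- pvJoinGo is pvCut with the current block prepended
theorem pvJoinGo_cut (ls : List String) (cur : List String) :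
    pvJoinGo cur ls =
      PySem.Str.join "\n" (cur ++ ls.takeWhile (fun l => !(PySem.Str.startswith l "{")))
        :: pvCut (ls.drop (ls.takeWhile (fun l => !(PySem.Str.startswith l "{"))).length) := by
  induction ls generalizing cur with
  | nil => simp [pvJoinGo, pvCut]
  | cons l ls ih =>
      by_cases hq : PySem.Chars.startswith l.toList ['{'] = true
      · rw [show pvJoinGo cur (l :: ls) = PySem.Str.join "\n" cur :: pvJoinGo [l] ls from by
            simp [pvJoinGo, hq]]
        rw [show List.takeWhile (fun x => !PySem.Str.startswith x "{") (l :: ls) = [] from by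
            simp [List.takeWhile_cons, hq]]
        simp only [List.length_nil, List.drop_zero, List.append_nil]
        rw [pvCut_cons, ih [l]]
        simp
      · rw [show pvJoinGo cur (l :: ls) = pvJoinGo (cur ++ [l]) ls from by
            simp [pvJoinGo, hq]]
        rw [ih (cur ++ [l]),
          show List.takeWhile (fun x => !PySem.Str.startswith x "{") (l :: ls)
              = l :: List.takeWhile (fun x => !PySem.Str.startswith x "{") ls from by
            simp [List.takeWhile_cons, hq]]
        simp

theorem parse_eq (content : String) :
    parse_atc_blocks content = parse_atc_blocks_alt content := by
  unfold parse_atc_blocks parse_atc_blocks_alt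
  dsimp only
  rw [pvFoldA_filter]
  set ne := (PySem.Str.splitlines content).filter (fun l => !(PySem.Str.strip l == "")) with hne
  have hnb : ∀ l ∈ ne, ¬(PySem.Str.strip l == "") := by
    intro l hl
    have := List.of_mem_filter hl
    simpa using this
  match hcase : ne with
  | [] => simp [pvCut]
  | h :: rest =>
      have hh : ¬(PySem.Str.strip h == "") := hnb h (by simp)
      have hrest : ∀ l ∈ rest, ¬(PySem.Str.strip l == "") := by
        intro l hl; exact hnb l (by simp [hl])
      have hstep : pvStepA ([], []) h = ([], [h]) := by
        simp [pvStepA, hh]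
      simp only [List.foldl_cons, hstep]
      rw [pvFoldA_joinGo rest [h] [] (by simp) hrest]
      rw [pvJoinGo_cut rest [h]]
      rw [pvCut_cons]
      simp

-- ===== VERDICT (by name: the statement is the Claim_ definition above) =====
theorem parse_atc_blocks_spec : Claim_equal_parse_atc_blocks := by
  intro content _
  unfold Spec_parse_atc_blocks
  exact parse_eq content
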